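-- pv_equiv track=rewrite | github.com/JulianH89/oligo-finder-nf | bin/convert_to_order.py | order_oligo_sense
-- ===== SOURCE A (Python) =====
-- def order_oligo_sense(oligo, sense_length):
--     """
--     Converts a sense strand to TriLink format, applying 2'-O-methyl
--     modifications to the 3rd consecutive purine (A/G) to avoid
--     an immune response.
--
--     Args:
--         oligo: The input oligonucleotide sequence.
--         sense_length: The length of the sense strand to process.
--
--     Returns:
--         The formatted string for synthesis.
--     """
--     sense = oligo[5 : 5 + sense_length]
--     mod_nuc_parts = []
--     purine_flag = 0
--
--     full_m_mod = {'C': 'mC', 'U': 'mU', 'A': 'mA', 'G': 'mG'}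
--
--     for i, base in enumerate(sense):
--         mod_base = base
--         if i < 2:
--             mod_base = full_m_mod.get(base, base)
--             mod_nuc_parts.append(mod_base + ".")
--         elif 2 <= i <= 12:
--             # Tripurine logic
--             if base in ('A', 'G'):
--                 purine_flag += 1
--             else:
--                 purine_flag = 0
--
--             purine_modulus = purine_flag % 3
--
--             # Apply modifications
--             if base in ('C', 'U'):
--                 mod_base = 'm' + base
--             elif base in ('A', 'G') and purine_flag > 0 and purine_modulus == 0:
--                 mod_base = 'm' + base
--
--             linkage = "." if i < 12 else "#"
--             mod_nuc_parts.append(mod_base + linkage)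
--         else: # i > 12
--             mod_base = full_m_mod.get(base, base)
--             mod_nuc_parts.append(mod_base)
--
--     return "".join(mod_nuc_parts) + "#mA1"
-- ===== SOURCE B (Python) =====
-- def order_oligo_sense(oligo, sense_length):
--     sense = oligo[5:5 + sense_length]
--     full_m_mod = {'C': 'mC', 'U': 'mU', 'A': 'mA', 'G': 'mG'}
--     # Pass 1: record the sense indices (2..12) of every 3rd consecutive purine.
--     meth = []
--     run = 0
--     for j, base in enumerate(sense[2:13]):
--         if base in ('A', 'G'):
--             run += 1
--             if run % 3 == 0:
--                 meth.append(j + 2)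
--         else:
--             run = 0
--     # Pass 2: stateless per-position formatting using the precomputed indices.
--     toks = []
--     for i, base in enumerate(sense):
--         if i < 2:
--             toks.append(full_m_mod.get(base, base) + ".")
--         elif i <= 12:
--             core = "m" + base if base in ('C', 'U') or i in meth else base
--             toks.append(core + ("." if i < 12 else "#"))
--         else:
--             toks.append(full_m_mod.get(base, base))
--     return "".join(toks) + "#mA1"
-- ===== Notes on version B (the rewrite author's own statement) =====
-- stated objective: alternative
-- what changed: A's single stateful loop (threading a purine-run counter through the token builder) is replaced by two passes: a scan of sense[2:13] that precomputes the list of indices of every 3rd consecutive purine, then a stateless per-position formatter that decides each token from the index, the base and that precomputed list.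
import Mathlib
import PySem

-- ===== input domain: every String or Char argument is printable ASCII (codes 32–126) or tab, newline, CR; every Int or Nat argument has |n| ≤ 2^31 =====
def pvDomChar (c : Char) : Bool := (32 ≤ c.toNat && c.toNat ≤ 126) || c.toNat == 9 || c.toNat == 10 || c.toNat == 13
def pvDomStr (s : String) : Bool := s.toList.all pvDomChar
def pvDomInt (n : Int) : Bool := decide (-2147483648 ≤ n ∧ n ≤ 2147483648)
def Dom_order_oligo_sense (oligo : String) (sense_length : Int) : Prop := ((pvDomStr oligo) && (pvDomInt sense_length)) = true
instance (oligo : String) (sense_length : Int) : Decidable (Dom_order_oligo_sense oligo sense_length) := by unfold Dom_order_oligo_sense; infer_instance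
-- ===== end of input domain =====

-- B replaces A's single stateful loop by two passes: a scan of sense[2:13] that records
-- the indices of every 3rd consecutive purine, then a stateless per-position formatter
-- (objective: alternative decomposition, same cost).

-- ===== PORT A =====
def pvFullMMod : PySem.Dict Char String :=
  PySem.Dict.ofList [('C', "mC"), ('U', "mU"), ('A', "mA"), ('G', "mG")]

-- the body of A's 'for i, base in enumerate(sense)' loop, state = (mod_nuc_parts, purine_flag)
def pvAStep (st : List String × Int) (ib : Int × Char) : List String × Int :=
  if ib.1 < 2 then
    (st.1 ++ [pvFullMMod.getD ib.2 (String.ofList [ib.2]) ++ "."], st.2)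
  else if 2 ≤ ib.1 ∧ ib.1 ≤ 12 then
    let flag := if ib.2 = 'A' ∨ ib.2 = 'G' then st.2 + 1 else 0
    let pm := PySem.Int.mod flag 3
    let modBase :=
      if ib.2 = 'C' ∨ ib.2 = 'U' then "m" ++ String.ofList [ib.2]
      else if (ib.2 = 'A' ∨ ib.2 = 'G') ∧ flag > 0 ∧ pm = 0 then "m" ++ String.ofList [ib.2]
      else String.ofList [ib.2]
    let linkage := if ib.1 < 12 then "." else "#"
    (st.1 ++ [modBase ++ linkage], flag)
  else
    (st.1 ++ [pvFullMMod.getD ib.2 (String.ofList [ib.2])], st.2)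

def order_oligo_sense (oligo : String) (sense_length : Int) : String :=
  let sense := PySem.List.slice oligo.toList (some 5) (some (5 + sense_length))
  let res := (PySem.List.enumerate sense 0).foldl pvAStep ([], 0)
  PySem.Str.join "" res.1 ++ "#mA1"

-- ===== PORT B =====
def pvBMap : PySem.Dict Char String :=
  PySem.Dict.ofList [('C', "mC"), ('U', "mU"), ('A', "mA"), ('G', "mG")]

-- pass 1: body of the scan over enumerate(sense[2:13]), state = (meth, run)
def pvBScan (st : List Int × Int) (jb : Int × Char) : List Int × Int :=
  if jb.2 = 'A' ∨ jb.2 = 'G' then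
    (if PySem.Int.mod (st.2 + 1) 3 = 0 then st.1 ++ [jb.1 + 2] else st.1, st.2 + 1)
  else (st.1, 0)

-- pass 2: the stateless per-position token
def pvBTok (meth : List Int) (ib : Int × Char) : String :=
  if ib.1 < 2 then pvBMap.getD ib.2 (String.ofList [ib.2]) ++ "."
  else if ib.1 ≤ 12 then
    (if ib.2 = 'C' ∨ ib.2 = 'U' ∨ ib.1 ∈ meth then "m" ++ String.ofList [ib.2] else String.ofList [ib.2])
      ++ (if ib.1 < 12 then "." else "#")
  else pvBMap.getD ib.2 (String.ofList [ib.2])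

def order_oligo_sense_alt (oligo : String) (sense_length : Int) : String :=
  let sense := PySem.List.slice oligo.toList (some 5) (some (5 + sense_length))
  let meth := ((PySem.List.enumerate (PySem.List.slice sense (some 2) (some 13)) 0).foldl pvBScan ([], 0)).1
  PySem.Str.join "" ((PySem.List.enumerate sense 0).map (pvBTok meth)) ++ "#mA1"

-- ===== PRECONDITION & SPEC =====
def Spec_order_oligo_sense (oligo : String) (sense_length : Int) (out : String) : Prop := out = order_oligo_sense_alt oligo sense_length
instance (oligo : String) (sense_length : Int) (out : String) : Decidable (Spec_order_oligo_sense oligo sense_length out) := by unfold Spec_order_oligo_sense; infer_instance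

-- ===== CLAIM (what is proved, stated in full; the proofs are below) =====
def Claim_equal_order_oligo_sense : Prop := ∀ (oligo : String) (sense_length : Int), Dom_order_oligo_sense oligo sense_length → Spec_order_oligo_sense oligo sense_length (order_oligo_sense oligo sense_length)

-- ===== LEMMAS AND PROOFS =====

-- meth indices contributed by middle characters ms, given current run count and absolute index
def pvMethFrom : List Char → Int → Int → List Int
  | [], _, _ => []
  | c :: cs, run, idx =>
    if c = 'A' ∨ c = 'G' then
      (if PySem.Int.mod (run + 1) 3 = 0 then [idx] else []) ++ pvMethFrom cs (run + 1) (idx + 1)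
    else pvMethFrom cs 0 (idx + 1)

def pvRunAfter : List Char → Int → Int
  | [], f => f
  | c :: cs, f => pvRunAfter cs (if c = 'A' ∨ c = 'G' then f + 1 else 0)

theorem pvMethFrom_lb (ms : List Char) : ∀ (run idx j : Int), j ∈ pvMethFrom ms run idx → idx ≤ j := by
  induction ms with
  | nil => intro run idx j h; simp [pvMethFrom] at h
  | cons c cs ih =>
    intro run idx j h
    simp only [pvMethFrom] at h
    by_cases hp : c = 'A' ∨ c = 'G'
    · simp only [hp, if_true, List.mem_append] at h
      rcases h with h | h
      · split at h <;> simp at h; omega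
      · have := ih _ _ _ h; omega
    · simp only [hp, if_false] at h
      have := ih _ _ _ h; omega

theorem pvScan_eq (ms : List Char) : ∀ (s run : Int) (acc : List Int),
    (PySem.List.enumerate ms s).foldl pvBScan (acc, run)
      = (acc ++ pvMethFrom ms run (s + 2), pvRunAfter ms run) := by
  induction ms with
  | nil => intro s run acc; simp [PySem.List.enumerate_nil, pvMethFrom, pvRunAfter]
  | cons c cs ih =>
    intro s run acc
    rw [PySem.List.enumerate_cons]
    simp only [List.foldl_cons]
    by_cases hp : c = 'A' ∨ c = 'G'
    · simp only [pvBScan, hp, if_true]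
      rw [ih]
      simp only [pvMethFrom, pvRunAfter, hp, if_true]
      have h3 : s + 1 + 2 = s + 2 + 1 := by ring
      rw [h3]
      split <;> simp
    · simp only [pvBScan, hp, if_false]
      rw [ih]
      simp only [pvMethFrom, pvRunAfter, hp, if_false]
      have h3 : s + 1 + 2 = s + 2 + 1 := by ring
      rw [h3]

theorem pvMap_eq : pvFullMMod = pvBMap := rfl

theorem pvHead (h : List Char) : ∀ (s f : Int) (parts : List String) (meth : List Int),
    s + (h.length : Int) ≤ 2 →
    (PySem.List.enumerate h s).foldl pvAStep (parts, f)
      = (parts ++ (PySem.List.enumerate h s).map (pvBTok meth), f) := by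
  induction h with
  | nil => intro s f parts meth _; simp [PySem.List.enumerate_nil]
  | cons c cs ih =>
    intro s f parts meth hb
    have hlen : s + (cs.length : Int) + 1 ≤ 2 := by
      simp only [List.length_cons] at hb; push_cast at hb; omega
    have hs : s < 2 := by omega
    rw [PySem.List.enumerate_cons]
    simp only [List.foldl_cons, List.map_cons]
    have hstep : pvAStep (parts, f) (s, c) = (parts ++ [pvBTok meth (s, c)], f) := by
      simp [pvAStep, pvBTok, hs, pvMap_eq]
    rw [hstep, ih (s + 1) f (parts ++ [pvBTok meth (s, c)]) meth (by omega)]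
    simp

theorem pvTail (t : List Char) : ∀ (s f : Int) (parts : List String) (meth : List Int),
    13 ≤ s →
    (PySem.List.enumerate t s).foldl pvAStep (parts, f)
      = (parts ++ (PySem.List.enumerate t s).map (pvBTok meth), f) := by
  induction t with
  | nil => intro s f parts meth _; simp [PySem.List.enumerate_nil]
  | cons c cs ih =>
    intro s f parts meth hb
    have h1 : ¬ s < 2 := by omega
    have h3 : ¬ s ≤ 12 := by omega
    rw [PySem.List.enumerate_cons]
    simp only [List.foldl_cons, List.map_cons]
    have hstep : pvAStep (parts, f) (s, c) = (parts ++ [pvBTok meth (s, c)], f) := by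
      simp [pvAStep, pvBTok, h1, h3, pvMap_eq]
    rw [hstep, ih (s + 1) f (parts ++ [pvBTok meth (s, c)]) meth (by omega)]
    simp

theorem pvMid (m : List Char) : ∀ (s f : Int) (parts : List String) (meth : List Int),
    2 ≤ s → s + (m.length : Int) ≤ 13 → 0 ≤ f →
    (∀ j, s ≤ j → (j ∈ meth ↔ j ∈ pvMethFrom m f s)) →
    (PySem.List.enumerate m s).foldl pvAStep (parts, f)
      = (parts ++ (PySem.List.enumerate m s).map (pvBTok meth), pvRunAfter m f) := by
  induction m with
  | nil => intro s f parts meth _ _ _ _; simp [PySem.List.enumerate_nil, pvRunAfter]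
  | cons c cs ih =>
    intro s f parts meth hs2 hb hf H
    have hs12 : s ≤ 12 := by simp only [List.length_cons] at hb; push_cast at hb; omega
    have hb' : (s + 1) + (cs.length : Int) ≤ 13 := by
      simp only [List.length_cons] at hb; push_cast at hb; omega
    have h1 : ¬ s < 2 := by omega
    rw [PySem.List.enumerate_cons]
    simp only [List.foldl_cons, List.map_cons]
    by_cases hp : c = 'A' ∨ c = 'G'
    · have hCU : ¬ (c = 'C' ∨ c = 'U') := by
        rcases hp with h | h <;> subst h <;> simp
      have hf1 : (0 : Int) < f + 1 := by omega
      have hmem : (s ∈ meth) ↔ 3 ∣ (f + 1) := by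
        rw [H s le_rfl, ← PySem.Int.mod_eq_zero_iff_dvd]
        simp only [pvMethFrom, hp, if_true, List.mem_append]
        constructor
        · rintro (h | h)
          · revert h; split
            · intro _; assumption
            · intro h; simp at h
          · exact absurd (pvMethFrom_lb _ _ _ _ h) (by omega)
        · intro h; left; rw [if_pos h]; simp
      have hC : c ≠ 'C' := fun hc => hCU (Or.inl hc)
      have hU : c ≠ 'U' := fun hc => hCU (Or.inr hc)
      have hstep : pvAStep (parts, f) (s, c) = (parts ++ [pvBTok meth (s, c)], f + 1) := by
        simp [pvAStep, pvBTok, h1, hs2, hs12, hp, hC, hU, hmem, hf1]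
      have H' : ∀ j, s + 1 ≤ j → (j ∈ meth ↔ j ∈ pvMethFrom cs (f + 1) (s + 1)) := by
        intro j hj
        rw [H j (by omega)]
        simp only [pvMethFrom, hp, if_true, List.mem_append]
        constructor
        · rintro (h | h)
          · exfalso; revert h; split
            · intro h; simp at h; omega
            · intro h; simp at h
          · exact h
        · intro h; right; exact h
      rw [hstep, ih (s + 1) (f + 1) (parts ++ [pvBTok meth (s, c)]) meth (by omega) hb' (by omega) H']
      simp [pvRunAfter, hp]
    · have hnotin : ¬ s ∈ meth := by
        rw [H s le_rfl]
        simp only [pvMethFrom, hp, if_false]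
        intro h
        exact absurd (pvMethFrom_lb _ _ _ _ h) (by omega)
      have hstep : pvAStep (parts, f) (s, c) = (parts ++ [pvBTok meth (s, c)], 0) := by
        simp [pvAStep, pvBTok, h1, hs2, hs12, hp, hnotin]
      have H' : ∀ j, s + 1 ≤ j → (j ∈ meth ↔ j ∈ pvMethFrom cs 0 (s + 1)) := by
        intro j hj
        rw [H j (by omega)]
        simp only [pvMethFrom, hp, if_false]
      rw [hstep, ih (s + 1) 0 (parts ++ [pvBTok meth (s, c)]) meth (by omega) hb' le_rfl H']
      simp [pvRunAfter, hp]

theorem pvMain (cs : List Char) :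
    ((PySem.List.enumerate cs 0).foldl pvAStep ([], 0)).1
      = (PySem.List.enumerate cs 0).map (pvBTok (pvMethFrom ((cs.drop 2).take 11) 0 2)) := by
  set meth := pvMethFrom ((cs.drop 2).take 11) 0 2 with hmeth
  have hdec : cs = cs.take 2 ++ ((cs.drop 2).take 11 ++ cs.drop 13) := by
    conv_lhs => rw [← List.take_append_drop 2 cs]
    congr 1
    conv_lhs => rw [← List.take_append_drop 11 (cs.drop 2)]
    congr 1
    rw [List.drop_drop]
  conv_lhs => rw [hdec]
  conv_rhs => rw [hdec]
  rw [PySem.List.enumerate_append, PySem.List.enumerate_append,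
      List.foldl_append, List.map_append, List.map_append]
  rw [pvHead (cs.take 2) 0 0 [] meth (by simp only [List.length_take]; push_cast; omega)]
  by_cases hlen : cs.length ≤ 2
  · have hd2 : cs.drop 2 = [] := List.drop_eq_nil_of_le hlen
    have hd13 : cs.drop 13 = [] := List.drop_eq_nil_of_le (by omega)
    simp [hd2, hd13, PySem.List.enumerate_nil]
  · have ht2 : (cs.take 2).length = 2 := by rw [List.length_take]; omega
    have hml : ((cs.drop 2).take 11).length ≤ 11 := by
      rw [List.length_take]; omega
    have hstart : (0 : Int) + ((cs.take 2).length : Int) = 2 := by rw [ht2]; norm_num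
    rw [hstart, List.foldl_append]
    rw [pvMid ((cs.drop 2).take 11) 2 0 ([] ++ List.map (pvBTok meth) (PySem.List.enumerate (cs.take 2) 0)) meth
        le_rfl (by omega) le_rfl (fun j _ => Iff.rfl)]
    by_cases hlen13 : cs.length ≤ 13
    · have hd13 : cs.drop 13 = [] := List.drop_eq_nil_of_le hlen13
      simp [hd13, PySem.List.enumerate_nil]
    · have hml11 : ((cs.drop 2).take 11).length = 11 := by
        rw [List.length_take, List.length_drop]; omega
      have hstart3 : (2 : Int) + (((cs.drop 2).take 11).length : Int) = 13 := by
        rw [hml11]; norm_num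
      rw [hstart3, pvTail (cs.drop 13) 13 (pvRunAfter ((cs.drop 2).take 11) 0) _ meth le_rfl]
      simp

-- ===== VERDICT (by name: the statement is the Claim_ definition above) =====
theorem order_oligo_sense_spec : Claim_equal_order_oligo_sense := by
  intro oligo sense_length _
  unfold Spec_order_oligo_sense
  simp only [order_oligo_sense, order_oligo_sense_alt]
  set cs := PySem.List.slice oligo.toList (some 5) (some (5 + sense_length)) with hcs
  have hmid : PySem.List.slice cs (some 2) (some 13) = (cs.drop 2).take 11 := by
    rw [PySem.List.slice_toNat cs (by norm_num) (by norm_num)]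
    simp
  rw [hmid, pvScan_eq]
  have h02 : (0 : Int) + 2 = 2 := by norm_num
  simp only [List.nil_append, h02]
  rw [pvMain cs]
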